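-- pv_equiv track=rewrite | github.com/sasniy/JobRecognizer | data_proccesing.py | preprocessed_text
-- ===== SOURCE A (Python) =====
-- def preprocessed_text(annotations):
--     req = []
--     terms = []
--     charge = []
--     notes = []
--     for text, label in annotations:
--         if label == 'req':
--             req.append(text)
--         elif label == 'term':
--             terms.append(text)
--         elif label == 'resp':
--             charge.append(text)
--         elif label == 'note':
--             notes.append(text)
--     return req, terms, charge, notes
-- ===== SOURCE B (Python) =====
-- def preprocessed_text(annotations):
--     def grab(lab):
--         return [text for text, label in annotations if label == lab]
--     return grab('req'), grab('term'), grab('resp'), grab('note')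
-- ===== Notes on version B (the rewrite author's own statement) =====
-- stated objective: idiomatic
-- what changed: Replaces the single pass with mutable accumulators and an if/elif chain by four independent filtering comprehensions, one per label, returned directly.
import Mathlib
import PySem

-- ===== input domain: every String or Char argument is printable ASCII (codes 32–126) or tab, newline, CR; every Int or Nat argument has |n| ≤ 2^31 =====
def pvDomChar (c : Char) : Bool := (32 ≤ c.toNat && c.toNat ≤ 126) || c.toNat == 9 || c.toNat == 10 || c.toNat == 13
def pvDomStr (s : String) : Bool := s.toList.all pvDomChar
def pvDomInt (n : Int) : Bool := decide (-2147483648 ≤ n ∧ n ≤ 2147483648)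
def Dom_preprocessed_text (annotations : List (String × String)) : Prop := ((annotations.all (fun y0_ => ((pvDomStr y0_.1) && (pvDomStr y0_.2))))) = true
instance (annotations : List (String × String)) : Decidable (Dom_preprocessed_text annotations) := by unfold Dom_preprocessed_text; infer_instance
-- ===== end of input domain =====

-- B replaces A's single pass with mutable accumulators and an if/elif chain by one filtering pass per label (idiomatic).

-- ===== PORT A =====
def pvStepA (s : List String × List String × List String × List String) (tl : String × String) :
    List String × List String × List String × List String :=
  if tl.2 == "req" then (s.1 ++ [tl.1], s.2.1, s.2.2.1, s.2.2.2)
  else if tl.2 == "term" then (s.1, s.2.1 ++ [tl.1], s.2.2.1, s.2.2.2)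
  else if tl.2 == "resp" then (s.1, s.2.1, s.2.2.1 ++ [tl.1], s.2.2.2)
  else if tl.2 == "note" then (s.1, s.2.1, s.2.2.1, s.2.2.2 ++ [tl.1])
  else s

def preprocessed_text (annotations : List (String × String)) : List String × List String × List String × List String :=
  annotations.foldl pvStepA ([], [], [], [])

-- ===== PORT B =====
def pvGrab (annotations : List (String × String)) (lab : String) : List String :=
  annotations.filterMap (fun tl => if tl.2 == lab then some tl.1 else none)

def preprocessed_text_alt (annotations : List (String × String)) : List String × List String × List String × List String :=
  (pvGrab annotations "req", pvGrab annotations "term", pvGrab annotations "resp", pvGrab annotations "note")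

-- ===== PRECONDITION & SPEC =====
def Spec_preprocessed_text (annotations : List (String × String)) (out : List String × List String × List String × List String) : Prop := out = preprocessed_text_alt annotations
instance (annotations : List (String × String)) (out : List String × List String × List String × List String) : Decidable (Spec_preprocessed_text annotations out) := by unfold Spec_preprocessed_text; infer_instance

-- ===== CLAIM (what is proved, stated in full; the proofs are below) =====
def Claim_equal_preprocessed_text : Prop := ∀ (annotations : List (String × String)), Dom_preprocessed_text annotations → Spec_preprocessed_text annotations (preprocessed_text annotations)

-- ===== LEMMAS AND PROOFS =====
theorem pv_fold_inv (annotations : List (String × String))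
    (s : List String × List String × List String × List String) :
    annotations.foldl pvStepA s =
      (s.1 ++ pvGrab annotations "req", s.2.1 ++ pvGrab annotations "term",
       s.2.2.1 ++ pvGrab annotations "resp", s.2.2.2 ++ pvGrab annotations "note") := by
  induction annotations generalizing s with
  | nil => simp [pvGrab]
  | cons tl rest ih =>
    simp only [List.foldl_cons, ih, pvGrab, List.filterMap_cons, pvStepA]
    by_cases h1 : tl.2 = "req"
    · simp [h1]
    · by_cases h2 : tl.2 = "term"
      · simp [h2]
      · by_cases h3 : tl.2 = "resp"
        · simp [h3]
        · by_cases h4 : tl.2 = "note"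
          · simp [h4]
          · simp [h1, h2, h3, h4]

-- ===== VERDICT (by name: the statement is the Claim_ definition above) =====
theorem preprocessed_text_spec : Claim_equal_preprocessed_text := by
  intro annotations _
  unfold Spec_preprocessed_text preprocessed_text preprocessed_text_alt
  simp [pv_fold_inv]
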